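-- pv_equiv track=rewrite | github.com/AdrijusC/adrijusc.github.io | Py nd/zenkliukai.py | kaina
-- ===== SOURCE A (Python) =====
-- def kaina(skaic):
--
--     kainos = {}
--     for v, k in skaic.items():
--         suma = 0
--         for i in range(1, k + 1):
--             if i <= 3:
--                 suma += 5
--             elif i == 4:
--                 suma += 4
--             elif i == 5:
--                 suma += 3
--             elif i == 6:
--                 suma += 2
--             else:
--                 suma += 1
--         kainos[v] = (k, suma)
--     return kainos
-- ===== SOURCE B (Python) =====
-- def kaina(skaic):
--     def price(k):
--         if k <= 0:
--             return 0
--         if k <= 3: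
--             return 5 * k
--         if k <= 6:
--             return (19, 22, 24)[k - 4]
--         return k + 18
--     return {v: (k, price(k)) for v, k in skaic.items()}
-- ===== Notes on version B (the rewrite author's own statement) =====
-- stated objective: alternative
-- what changed: Replaces the per-item inner loop summing a piecewise tariff over range(1, k+1) with a closed-form piecewise price evaluated once per item, and replaces the incremental dict build by a direct comprehension/map over the items (keys of a dict are distinct).
import Mathlib
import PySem

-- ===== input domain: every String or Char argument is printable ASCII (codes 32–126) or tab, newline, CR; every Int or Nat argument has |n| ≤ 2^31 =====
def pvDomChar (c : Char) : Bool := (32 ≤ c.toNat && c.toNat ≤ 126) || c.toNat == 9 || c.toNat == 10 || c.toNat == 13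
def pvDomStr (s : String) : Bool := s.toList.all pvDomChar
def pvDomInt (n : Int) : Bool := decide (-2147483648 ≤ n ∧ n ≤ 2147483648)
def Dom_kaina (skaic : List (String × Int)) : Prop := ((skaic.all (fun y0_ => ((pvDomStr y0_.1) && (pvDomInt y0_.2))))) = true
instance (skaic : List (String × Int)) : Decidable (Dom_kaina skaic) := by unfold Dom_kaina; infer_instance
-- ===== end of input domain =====

-- B replaces A's inner tariff loop by a closed-form piecewise price and builds the
-- result by a single comprehension over the items instead of incremental dict inserts
-- (objective: alternative).

-- ===== PORT A =====
-- inner loop: for i in range(1, k+1): suma += 5/4/3/2/1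
def kainaSuma (k : Int) : Int :=
  (PySem.List.pyRange 1 (k + 1) 1).foldl
    (fun suma i =>
      if i ≤ 3 then suma + 5
      else if i = 4 then suma + 4
      else if i = 5 then suma + 3
      else if i = 6 then suma + 2
      else suma + 1) 0

def kaina (skaic : List (String × Int)) : List (String × Int × Int) :=
  (skaic.foldl (fun kainos vk => kainos.insert vk.1 (vk.2, kainaSuma vk.2))
    (PySem.Dict.empty : PySem.Dict String (Int × Int))).items

-- ===== PORT B =====
-- closed-form price of k items; (19, 22, 24)[k - 4] ported as the three literal cases
def kainaPrice (k : Int) : Int :=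
  if k ≤ 0 then 0
  else if k ≤ 3 then 5 * k
  else if k ≤ 6 then (if k = 4 then 19 else if k = 5 then 22 else 24)
  else k + 18

-- dict comprehension over the items of a dict: keys are distinct, so it is a map
def kaina_alt (skaic : List (String × Int)) : List (String × Int × Int) :=
  skaic.map (fun vk => (vk.1, vk.2, kainaPrice vk.2))

-- ===== PRECONDITION & SPEC =====
-- A's parameter is a Python dict; its association-list representation therefore has
-- pairwise-distinct keys. Pre_ states exactly that shape; it excludes no input the
-- Python function accepts (a dict cannot carry duplicate keys).
def Pre_kaina (skaic : List (String × Int)) : Prop := (skaic.map Prod.fst).Nodup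
instance (skaic : List (String × Int)) : Decidable (Pre_kaina skaic) := by unfold Pre_kaina; infer_instance
def pvWitness_kaina : (List (String × Int)) := [("a", 2), ("b", 7)]

def Spec_kaina (skaic : List (String × Int)) (out : List (String × Int × Int)) : Prop := out = kaina_alt skaic
instance (skaic : List (String × Int)) (out : List (String × Int × Int)) : Decidable (Spec_kaina skaic out) := by unfold Spec_kaina; infer_instance

-- ===== CLAIM =====
def Claim_equal_kaina : Prop := ∀ (skaic : List (String × Int)), Dom_kaina skaic → Pre_kaina skaic → Spec_kaina skaic (kaina skaic)

-- ===== LEMMAS AND PROOFS =====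

-- the loop sum, with k positive, peels its last step
lemma kainaSuma_succ (k : Int) (hk : 1 ≤ k) :
    kainaSuma k =
      (if k ≤ 3 then kainaSuma (k - 1) + 5
       else if k = 4 then kainaSuma (k - 1) + 4
       else if k = 5 then kainaSuma (k - 1) + 3
       else if k = 6 then kainaSuma (k - 1) + 2
       else kainaSuma (k - 1) + 1) := by
  unfold kainaSuma
  rw [show k + 1 = (k - 1 + 1) + 1 by ring]
  rw [PySem.List.pyRange_one_succ_right (a := 1) (b := k - 1 + 1) (by omega)]
  rw [List.foldl_append]
  simp only [List.foldl_cons, List.foldl_nil]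
  rw [show k - 1 + 1 = k by ring]

lemma kainaSuma_nat (n : Nat) : kainaSuma (n : Int) = kainaPrice (n : Int) := by
  induction n with
  | zero => decide
  | succ m ih =>
    rw [show ((m + 1 : Nat) : Int) = (m : Int) + 1 by push_cast; ring,
        kainaSuma_succ ((m : Int) + 1) (by omega)]
    simp only [add_sub_cancel_right, ih]
    unfold kainaPrice
    split_ifs <;> omega

lemma kainaSuma_eq_price (k : Int) : kainaSuma k = kainaPrice k := by
  rcases le_or_gt k 0 with h | h
  · have h1 : kainaSuma k = 0 := by
      unfold kainaSuma
      rw [PySem.List.pyRange_one_eq_nil (a := 1) (b := k + 1) (by omega)]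
      rfl
    rw [h1]
    unfold kainaPrice
    simp [h]
  · have : k = ((k.toNat : Nat) : Int) := by omega
    rw [this, kainaSuma_nat]

-- ===== VERDICT =====
theorem kaina_spec : Claim_equal_kaina := by
  intro skaic _ hpre
  unfold Spec_kaina kaina kaina_alt
  rw [PySem.Dict.items_foldl_insert_fresh skaic Prod.fst
        (fun vk => (vk.2, kainaSuma vk.2)) PySem.Dict.empty
        (fun a _ => PySem.Dict.contains_empty a.1) hpre]
  simp [kainaSuma_eq_price, PySem.Dict.empty]
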